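-- pv_equiv track=rewrite | github.com/natepicch/Code | hello.py | cap
-- ===== SOURCE A (Python) =====
-- def cap(name):
--     i = 0
--     a = ''
--     b = []
--     while i != len(name):
--         if i == 0 or i == 3:
--             b.append(name[i].upper())
--         else:
--             b.append(name[i].lower())
--         i+=1
--
--     return a.join(b)
-- ===== SOURCE B (Python) =====
-- def cap(name):
--     return name[:1].upper() + name[1:3].lower() + name[3:4].upper() + name[4:].lower()
-- ===== Notes on version B (the rewrite author's own statement) =====
-- stated objective: simpler
-- what changed: Replaced the index-counting while loop that cases on each position with a closed-form expression of four slice-and-case operations (name[:1].upper() + name[1:3].lower() + name[3:4].upper() + name[4:].lower()).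
import Mathlib
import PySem

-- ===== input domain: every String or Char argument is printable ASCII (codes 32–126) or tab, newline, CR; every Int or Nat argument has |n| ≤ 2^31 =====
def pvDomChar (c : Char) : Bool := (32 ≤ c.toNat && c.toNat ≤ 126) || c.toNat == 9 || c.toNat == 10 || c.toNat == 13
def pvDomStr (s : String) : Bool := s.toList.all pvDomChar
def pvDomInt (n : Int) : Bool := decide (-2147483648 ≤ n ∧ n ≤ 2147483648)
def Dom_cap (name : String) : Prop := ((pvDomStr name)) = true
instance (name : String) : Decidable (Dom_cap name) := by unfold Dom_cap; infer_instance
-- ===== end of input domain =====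

-- B replaces A's character-by-character while loop with a closed-form of four slice-and-case operations (simpler).

-- ===== PORT A =====
-- the while loop: i walks the string, appending name[i].upper() at i ∈ {0,3}, else name[i].lower()
def capLoop (cs : List Char) (i : Int) (b : List Char) : List Char :=
  match cs with
  | [] => b
  | c :: rest =>
      capLoop rest (i + 1)
        (b ++ [if i == 0 || i == 3 then PySem.Chars.upperChar c else PySem.Chars.lowerChar c])

def cap (name : String) : String :=
  String.ofList (capLoop name.toList 0 [])

-- ===== PORT B =====
def cap_alt (name : String) : String :=
  String.ofList
    (PySem.Chars.upper (PySem.Chars.slice name.toList none (some 1)) ++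
     PySem.Chars.lower (PySem.Chars.slice name.toList (some 1) (some 3)) ++
     PySem.Chars.upper (PySem.Chars.slice name.toList (some 3) (some 4)) ++
     PySem.Chars.lower (PySem.Chars.slice name.toList (some 4) none))

-- ===== PRECONDITION & SPEC =====
def Spec_cap (name : String) (out : String) : Prop := out = cap_alt name
instance (name : String) (out : String) : Decidable (Spec_cap name out) := by unfold Spec_cap; infer_instance

-- ===== CLAIM (what is proved, stated in full; the proofs are below) =====
def Claim_equal_cap : Prop := ∀ (name : String), Dom_cap name → Spec_cap name (cap name)

-- ===== LEMMAS AND PROOFS =====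

theorem capLoop_append (cs : List Char) (i : Int) (b1 b2 : List Char) :
    capLoop cs i (b1 ++ b2) = b1 ++ capLoop cs i b2 := by
  induction cs generalizing i b1 b2 with
  | nil => simp [capLoop]
  | cons c rest ih =>
      simp only [capLoop, List.append_assoc]
      exact ih ..

theorem capLoop_acc (cs : List Char) (i : Int) (b : List Char) :
    capLoop cs i b = b ++ capLoop cs i [] := by
  simpa using capLoop_append cs i b []

theorem capLoop_tail (cs : List Char) (i : Int) (hi : 4 ≤ i) :
    capLoop cs i [] = cs.map PySem.Chars.lowerChar := by
  induction cs generalizing i with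
  | nil => simp [capLoop]
  | cons c rest ih =>
      have h0 : (i == 0) = false := by simp; omega
      have h3 : (i == 3) = false := by simp; omega
      simp only [capLoop, h0, h3, Bool.or_false, if_false, List.nil_append,
        Bool.false_eq_true, List.map_cons]
      rw [capLoop_acc, ih (i + 1) (by omega)]
      simp

-- ===== VERDICT (by name: the statement is the Claim_ definition above) =====
set_option maxHeartbeats 1000000 in
theorem cap_spec : Claim_equal_cap := by
  intro name _
  unfold Spec_cap cap cap_alt
  rcases hl : name.toList with _ | ⟨a, _ | ⟨b, _ | ⟨c, _ | ⟨d, rest⟩⟩⟩⟩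
  · clear hl; simp [capLoop, PySem.Chars.slice_eq_listSlice, PySem.List.slice, PySem.List.clampIdx, PySem.Chars.upper, PySem.Chars.lower]
  · clear hl; simp [capLoop, PySem.Chars.slice_eq_listSlice, PySem.List.slice, PySem.List.clampIdx, PySem.Chars.upper, PySem.Chars.lower]
  · clear hl; simp [capLoop, PySem.Chars.slice_eq_listSlice, PySem.List.slice, PySem.List.clampIdx, PySem.Chars.upper, PySem.Chars.lower]
  · clear hl; simp [capLoop, PySem.Chars.slice_eq_listSlice, PySem.List.slice, PySem.List.clampIdx, PySem.Chars.upper, PySem.Chars.lower]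
  · simp only [capLoop]
    rw [capLoop_acc, capLoop_tail rest (0 + 1 + 1 + 1 + 1) (by norm_num)]
    simp [PySem.Chars.slice_eq_listSlice, PySem.List.slice, PySem.List.clampIdx, PySem.Chars.upper, PySem.Chars.lower]
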